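-- pv_equiv track=rewrite | github.com/vivalite/AQL | aql_rubicon/wrappers.py | project_rows
-- ===== SOURCE A (Python) =====
-- from typing import Any, Iterable
--
-- def project_rows(rows: Iterable[dict[str, Any]], columns: list[str]) -> tuple[list[dict[str, Any]], list[str]]:
--     materialized = list(rows)
--     if columns == ["*"]:
--         output_columns = _columns_from_rows(materialized)
--     else:
--         output_columns = columns
--     projected: list[dict[str, Any]] = []
--     for row in materialized:
--         if output_columns:
--             projected.append({column: _lookup_column(row, column) for column in output_columns})
--         else:
--             projected.append(dict(row))
--     return projected, output_columns
--
-- def _lookup_column(row: dict[str, Any], column: str) -> Any: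
--     if column in row:
--         return row[column]
--     lowered = column.lower()
--     for key, value in row.items():
--         if key.lower() == lowered or key.lower().endswith(f".{lowered}"):
--             return value
--     return None
--
-- def _columns_from_rows(rows: Iterable[dict[str, Any]]) -> list[str]:
--     columns: list[str] = []
--     seen: set[str] = set()
--     for row in rows:
--         for column in row:
--             if column not in seen:
--                 seen.add(column)
--                 columns.append(column)
--     return columns
-- ===== SOURCE B (Python) =====
-- def project_rows(rows, columns):
--     materialized = list(rows)
--     if columns == ["*"]:
--         output_columns = list(dict.fromkeys(k for row in materialized for k in row))
--     else:
--         output_columns = columns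
--     if not output_columns:
--         return [dict(row) for row in materialized], output_columns
--     projected = []
--     for row in materialized:
--         # one pass over the row: index every lowered key and every dot-suffix
--         # of it, keeping the value of the earliest key per token
--         index = {}
--         for key, value in row.items():
--             lk = key.lower()
--             tokens = [lk] + [lk[i + 1:] for i, ch in enumerate(lk) if ch == "."]
--             for tok in tokens:
--                 if tok not in index:
--                     index[tok] = value
--         projected.append({c: (row[c] if c in row else index.get(c.lower()))
--                           for c in output_columns})
--     return projected, output_columns
-- ===== Notes on version B (the rewrite author's own statement) =====
-- stated objective: faster
-- what changed: Instead of re-scanning all row keys for every column (testing lower-equality and '.suffix' endswith per pair), B builds per row a one-pass token index mapping each lowered key and each of its dot-suffixes to the earliest key's value, so each column lookup is O(1); '*' column collection uses dict.fromkeys dedup.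
import Mathlib
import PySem

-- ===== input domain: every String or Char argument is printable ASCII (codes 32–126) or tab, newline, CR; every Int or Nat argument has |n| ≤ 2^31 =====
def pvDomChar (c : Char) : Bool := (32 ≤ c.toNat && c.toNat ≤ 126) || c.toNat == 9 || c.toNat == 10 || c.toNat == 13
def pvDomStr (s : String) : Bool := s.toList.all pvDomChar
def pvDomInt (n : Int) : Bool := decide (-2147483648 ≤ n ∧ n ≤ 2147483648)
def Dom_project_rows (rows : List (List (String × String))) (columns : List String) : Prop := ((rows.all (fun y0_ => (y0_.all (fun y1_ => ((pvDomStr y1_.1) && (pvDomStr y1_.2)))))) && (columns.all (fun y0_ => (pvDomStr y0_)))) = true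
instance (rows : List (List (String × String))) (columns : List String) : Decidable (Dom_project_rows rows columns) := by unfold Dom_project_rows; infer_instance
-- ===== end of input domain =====

-- B replaces A's per-column scan over all row keys by a per-row one-pass token index
-- (lowered key and each dot-suffix ↦ earliest value), making each column lookup O(1).
-- Rows are dicts in Python; each row list is read through PySem.Dict.ofList in both ports.

-- ===== PORT A =====
-- the fallback loop of _lookup_column: first key whose lowered form equals or
-- dot-suffix-matches `lowered` ('.'-prefixed endswith); lowered strings are List Char
def pvLookupScan (items : List (String × String)) (lowered : List Char) : Option String :=
  match items with
  | [] => none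
  | (k, v) :: rest =>
      if PySem.Chars.lower k.toList == lowered
         || PySem.Chars.endswith (PySem.Chars.lower k.toList) ('.' :: lowered) then some v
      else pvLookupScan rest lowered

def pvLookupColumn (row : PySem.Dict String String) (column : String) : Option String :=
  if row.contains column then row.get? column
  else pvLookupScan row.items (PySem.Chars.lower column.toList)

def pvColumnsFromRows (rows : List (PySem.Dict String String)) : List String :=
  (rows.foldl (fun acc row =>
      row.keys.foldl (fun (acc : List String × PySem.Set String) col =>
        if acc.2.contains col then acc else (acc.1 ++ [col], acc.2.add col)) acc)
    ([], ([] : PySem.Set String))).1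

def project_rows (rows : List (List (String × String))) (columns : List String) : (List (List (String × Option String))) × List String :=
  let materialized := rows.map (fun r => PySem.Dict.ofList r)
  let output_columns := if columns = ["*"] then pvColumnsFromRows materialized else columns
  let projected := materialized.map (fun row =>
    if output_columns ≠ [] then
      (output_columns.foldl (fun (d : PySem.Dict String (Option String)) c =>
        d.insert c (pvLookupColumn row c)) PySem.Dict.empty).items
    else row.items.map (fun p => (p.1, some p.2)))
  (projected, output_columns)

-- ===== PORT B =====
-- the dot-suffixes of a lowered key: [lk[i+1:] for i, ch in enumerate(lk) if ch == "."]
def pvDotSuffixes : List Char → List (List Char)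
  | [] => []
  | c :: rest => if c = '.' then rest :: pvDotSuffixes rest else pvDotSuffixes rest

-- register all tokens of one key (its lowered form and every dot-suffix), first key wins
def pvIndexStep (d : PySem.Dict (List Char) String) (kv : String × String) : PySem.Dict (List Char) String :=
  let lk := PySem.Chars.lower kv.1.toList
  (lk :: pvDotSuffixes lk).foldl
    (fun (d : PySem.Dict (List Char) String) t =>
      if d.contains t then d else d.insert t kv.2) d

-- per-row index: every token of every key ↦ value of the earliest key providing it
def pvBuildIndex (items : List (String × String)) : PySem.Dict (List Char) String :=
  items.foldl pvIndexStep PySem.Dict.empty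

def project_rows_alt (rows : List (List (String × String))) (columns : List String) : (List (List (String × Option String))) × List String :=
  let materialized := rows.map (fun r => PySem.Dict.ofList r)
  let output_columns :=
    if columns = ["*"] then PySem.List.dedup (materialized.flatMap (fun r => r.keys))
    else columns
  if output_columns = [] then
    (materialized.map (fun row => row.items.map (fun p => (p.1, some p.2))), output_columns)
  else
    (materialized.map (fun row =>
      let index := pvBuildIndex row.items
      (output_columns.foldl (fun (d : PySem.Dict String (Option String)) c =>
        d.insert c (if row.contains c then row.get? c
                    else index.get? (PySem.Chars.lower c.toList))) PySem.Dict.empty).items),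
     output_columns)

-- ===== PRECONDITION & SPEC =====
def Spec_project_rows (rows : List (List (String × String))) (columns : List String) (out : (List (List (String × Option String))) × List String) : Prop := out = project_rows_alt rows columns
instance (rows : List (List (String × String))) (columns : List String) (out : (List (List (String × Option String))) × List String) : Decidable (Spec_project_rows rows columns out) := by unfold Spec_project_rows; infer_instance

-- ===== CLAIM (what is proved, stated in full; the proofs are below) =====
def Claim_equal_project_rows : Prop := ∀ (rows : List (List (String × String))) (columns : List String), Dom_project_rows rows columns → Spec_project_rows rows columns (project_rows rows columns)

-- ===== LEMMAS AND PROOFS =====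

theorem mem_pvDotSuffixes (l t : List Char) : t ∈ pvDotSuffixes l ↔ ('.' :: t) <:+ l := by
  induction l with
  | nil => simp [pvDotSuffixes]
  | cons c rest ih =>
      by_cases hc : c = '.'
      · subst hc
        simp [pvDotSuffixes, ih, List.suffix_cons_iff]
      · simp only [pvDotSuffixes, if_neg hc]
        rw [ih, List.suffix_cons_iff]
        constructor
        · exact Or.inr
        · rintro (h | h)
          · injection h with h1 h2
            exact absurd h1.symm hc
          · exact h

theorem setdefault_fold_get (ts : List (List Char)) (v : String) (d : PySem.Dict (List Char) String) (x : List Char) :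
    ((ts.foldl (fun (d : PySem.Dict (List Char) String) t =>
        if d.contains t then d else d.insert t v) d).get? x)
      = (d.get? x).or (if x ∈ ts then some v else none) := by
  induction ts generalizing d with
  | nil => simp
  | cons t ts ih =>
      simp only [List.foldl_cons]
      rw [ih]
      by_cases hx : x = t
      · subst hx
        rw [PySem.Dict.contains_eq_isSome_get?]
        cases hg : d.get? x with
        | none => simp
        | some w => simp [hg]
      · by_cases hc : d.contains t
        · simp [hc, hx]
        · simp [hc, PySem.Dict.get?_insert, hx]

theorem indexStep_get (d : PySem.Dict (List Char) String) (kv : String × String) (t : List Char) :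
    (pvIndexStep d kv).get? t
      = (d.get? t).or
          (if t ∈ PySem.Chars.lower kv.1.toList :: pvDotSuffixes (PySem.Chars.lower kv.1.toList)
           then some kv.2 else none) := by
  unfold pvIndexStep
  exact setdefault_fold_get _ _ _ _

theorem buildIndex_get (items : List (String × String)) (d : PySem.Dict (List Char) String) (t : List Char) :
    ((items.foldl pvIndexStep d).get? t)
      = (d.get? t).or (pvLookupScan items t) := by
  induction items generalizing d with
  | nil => simp [pvLookupScan]
  | cons kv items ih =>
      obtain ⟨k, v⟩ := kv
      rw [List.foldl_cons, ih, indexStep_get]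
      have hcond : (PySem.Chars.lower k.toList == t
          || PySem.Chars.endswith (PySem.Chars.lower k.toList) ('.' :: t)) = true
          ↔ t ∈ PySem.Chars.lower k.toList :: pvDotSuffixes (PySem.Chars.lower k.toList) := by
        rw [List.mem_cons, mem_pvDotSuffixes, Bool.or_eq_true, beq_iff_eq,
          PySem.Chars.endswith_iff]
        constructor
        · rintro (h | h)
          · exact Or.inl h.symm
          · exact Or.inr h
        · rintro (h | h)
          · exact Or.inl h.symm
          · exact Or.inr h
      cases hg : d.get? t with
      | some w => simp [pvLookupScan]
      | none =>
          simp only [Option.none_or]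
          by_cases hm : t ∈ PySem.Chars.lower k.toList :: pvDotSuffixes (PySem.Chars.lower k.toList)
          · rw [if_pos hm]
            simp only [pvLookupScan]
            rw [if_pos (hcond.mpr hm)]
            simp
          · rw [if_neg hm]
            simp only [pvLookupScan, Option.none_or]
            rw [if_neg (fun h => hm (hcond.mp h))]

theorem index_eq_scan (items : List (String × String)) (t : List Char) :
    (pvBuildIndex items).get? t = pvLookupScan items t := by
  unfold pvBuildIndex
  rw [buildIndex_get]
  simp

theorem lookup_eq (row : PySem.Dict String String) (c : String) :
    pvLookupColumn row c
      = (if row.contains c then row.get? c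
         else (pvBuildIndex row.items).get? (PySem.Chars.lower c.toList)) := by
  unfold pvLookupColumn
  by_cases h : row.contains c
  · simp [h]
  · simp [h, index_eq_scan]

theorem pair_fold_eq (ks : List String) (s : PySem.Set String) :
    ks.foldl (fun (acc : List String × PySem.Set String) col =>
        if acc.2.contains col then acc else (acc.1 ++ [col], acc.2.add col)) (s, s)
      = (PySem.Set.update s ks, PySem.Set.update s ks) := by
  induction ks generalizing s with
  | nil => simp [PySem.Set.update]
  | cons c ks ih =>
      by_cases h : s.contains c
      · simp only [List.foldl_cons, PySem.Set.update, PySem.Set.add, h, if_pos]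
        exact ih s
      · simp only [List.foldl_cons, PySem.Set.update, PySem.Set.add, h, if_false,
          Bool.false_eq_true]
        exact ih (s ++ [c])

theorem outer_fold_eq (rows : List (PySem.Dict String String)) (s : PySem.Set String) :
    rows.foldl (fun acc row =>
        row.keys.foldl (fun (acc : List String × PySem.Set String) col =>
          if acc.2.contains col then acc else (acc.1 ++ [col], acc.2.add col)) acc) (s, s)
      = (PySem.Set.update s (rows.flatMap (fun r => r.keys)),
         PySem.Set.update s (rows.flatMap (fun r => r.keys))) := by
  induction rows generalizing s with
  | nil => simp [PySem.Set.update]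
  | cons r rows ih =>
      rw [List.foldl_cons, pair_fold_eq, ih]
      simp [PySem.Set.update, List.foldl_append]

theorem columns_from_rows_eq (rows : List (PySem.Dict String String)) :
    pvColumnsFromRows rows = PySem.List.dedup (rows.flatMap (fun r => r.keys)) := by
  unfold pvColumnsFromRows
  rw [outer_fold_eq]
  rw [PySem.List.dedup_eq_ofList, ← PySem.Set.update_nil_left]

theorem main_eq (rows : List (List (String × String))) (columns : List String) :
    project_rows rows columns = project_rows_alt rows columns := by
  simp only [project_rows, project_rows_alt]
  rw [columns_from_rows_eq]
  set m := rows.map (fun r => PySem.Dict.ofList r) with hm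
  set oc := if columns = ["*"]
      then PySem.List.dedup (m.flatMap (fun r => r.keys)) else columns with hoc
  by_cases h : oc = []
  · rw [if_pos h]
    simp [h]
  · rw [if_neg h]
    simp only [Prod.mk.injEq, and_true]
    apply List.map_congr_left
    intro row _
    rw [if_pos h]
    have hfun : (fun (d : PySem.Dict String (Option String)) c =>
          d.insert c (pvLookupColumn row c))
        = (fun (d : PySem.Dict String (Option String)) c =>
          d.insert c (if row.contains c then row.get? c
                      else (pvBuildIndex row.items).get? (PySem.Chars.lower c.toList))) := by
      funext d c
      rw [lookup_eq]
    rw [hfun]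

-- ===== VERDICT (by name: the statement is the Claim_ definition above) =====
theorem project_rows_spec : Claim_equal_project_rows := by
  unfold Claim_equal_project_rows
  intro rows columns _
  unfold Spec_project_rows
  exact main_eq rows columns
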